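-- pv_equiv track=rewrite | github.com/AtlantixJJ/KLiSH | lib/misc.py | dic2table
-- ===== SOURCE A (Python) =====
-- def dic2table(dic, transpose=True):
--     """Convert dict of depth 2 to latex table.
--
--     Args:
--       dic : In the form of dic[row_key][col_key].
--       transpose : When True, the row_key of dic corresponds to the
--                   col_key of the output table.
--     """
--     strs = []
--     col_names = list(next(iter(dic.values())).keys())
--     ncols = len(col_names) + 1
--     strs.append([""] + col_names)
--     for row_name, row_vals in dic.items():
--         strs.append([row_name] + [row_vals[k] for k in col_names])
--     if transpose:
--         nstrs = [[] for _ in range(len(strs[0]))]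
--         for j in range(len(strs[0])):
--             for i in range(len(strs)):
--                 nstrs[j].append(strs[i][j])
--         return nstrs
--     return strs
-- ===== SOURCE B (Python) =====
-- def dic2table(dic, transpose=True):
--     """Convert dict of depth 2 to latex table (column-major built directly when transposed)."""
--     col_names = list(next(iter(dic.values())).keys())
--     if transpose:
--         table = [[""] + list(dic.keys())]
--         for c in col_names:
--             table.append([c] + [dic[rn][c] for rn in dic])
--         return table
--     table = [[""] + col_names]
--     for row_name, row_vals in dic.items():
--         table.append([row_name] + [row_vals[k] for k in col_names])
--     return table
-- ===== Notes on version B (the rewrite author's own statement) =====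
-- stated objective: alternative
-- what changed: Instead of building the row-major table and then transposing it with nested index loops, B builds the transposed table directly column-by-column (header of row keys first, then one output row per column name), never materialising the intermediate row-major table.
import Mathlib
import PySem

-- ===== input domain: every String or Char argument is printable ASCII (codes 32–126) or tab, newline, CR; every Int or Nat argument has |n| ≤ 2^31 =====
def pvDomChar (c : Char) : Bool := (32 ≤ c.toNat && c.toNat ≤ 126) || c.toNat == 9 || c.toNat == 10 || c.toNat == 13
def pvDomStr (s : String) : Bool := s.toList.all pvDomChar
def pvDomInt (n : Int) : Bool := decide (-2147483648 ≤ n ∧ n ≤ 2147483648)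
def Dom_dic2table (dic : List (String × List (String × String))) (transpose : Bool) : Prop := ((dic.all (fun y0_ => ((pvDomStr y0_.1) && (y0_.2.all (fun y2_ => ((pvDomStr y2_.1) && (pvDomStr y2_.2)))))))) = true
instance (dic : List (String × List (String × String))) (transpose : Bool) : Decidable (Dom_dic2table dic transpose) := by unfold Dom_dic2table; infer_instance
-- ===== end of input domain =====

-- B builds the transposed table directly column-by-column instead of transposing the row-major table with nested index loops (objective: alternative decomposition, same cost).

-- shared input decoding: the Python argument is a dict of dicts; under the type convention the
-- association lists are read with Python-dict semantics (insertion order, overwrite in place)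
def pvDecode (dic : List (String × List (String × String))) :
    List (String × PySem.Dict String String) :=
  (PySem.Dict.ofList dic).items.map (fun p => (p.1, PySem.Dict.ofList p.2))

-- ===== PORT A =====
def dic2table (dic : List (String × List (String × String))) (transpose : Bool) : List (List String) :=
  let ds := pvDecode dic
  -- col_names = list(next(iter(dic.values())).keys())  (empty dict excluded by Pre_)
  let col_names := ((ds.headD ("", PySem.Dict.empty)).2).keys
  -- strs = [[""] + col_names] then one appended row per item (row_vals[k]; KeyError excluded by Pre_)
  let strs := ("" :: col_names) :: ds.map (fun rv => rv.1 :: col_names.map (fun k => rv.2.getD k ""))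
  if transpose then
    -- for j in range(len(strs[0])): for i in range(len(strs)): nstrs[j].append(strs[i][j])
    (PySem.List.pyRange 0 ((PySem.List.pyGetD strs 0 []).length : Int) 1).map (fun j =>
      (PySem.List.pyRange 0 (strs.length : Int) 1).foldl
        (fun acc i => acc ++ [PySem.List.pyGetD (PySem.List.pyGetD strs i []) j ""]) [])
  else strs

-- ===== PORT B =====
def dic2table_alt (dic : List (String × List (String × String))) (transpose : Bool) : List (List String) :=
  let ds := pvDecode dic
  let col_names := ((ds.headD ("", PySem.Dict.empty)).2).keys
  if transpose then
    ("" :: ds.map (·.1)) :: col_names.map (fun c => c :: ds.map (fun rv => rv.2.getD c ""))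
  else
    ("" :: col_names) :: ds.map (fun rv => rv.1 :: col_names.map (fun k => rv.2.getD k ""))

-- ===== PRECONDITION & SPEC =====
-- Pre_ excludes exactly the inputs where Python A raises: the empty dict (StopIteration) and
-- dicts in which some row lacks a column key of the first row (KeyError).
def Pre_dic2table (dic : List (String × List (String × String))) (transpose : Bool) : Prop :=
  dic ≠ [] ∧
  ∀ p ∈ pvDecode dic,
    ∀ k ∈ (((pvDecode dic).headD ("", PySem.Dict.empty)).2).keys, k ∈ p.2.keys
instance (dic : List (String × List (String × String))) (transpose : Bool) : Decidable (Pre_dic2table dic transpose) := by unfold Pre_dic2table; infer_instance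

def pvWitness_dic2table : (List (String × List (String × String))) × Bool :=
  ([("r1", [("a", "1"), ("b", "2")]), ("r2", [("a", "3"), ("b", "4")])], true)

def Spec_dic2table (dic : List (String × List (String × String))) (transpose : Bool) (out : List (List String)) : Prop := out = dic2table_alt dic transpose
instance (dic : List (String × List (String × String))) (transpose : Bool) (out : List (List String)) : Decidable (Spec_dic2table dic transpose out) := by unfold Spec_dic2table; infer_instance

-- ===== CLAIM (what is proved, stated in full; the proofs are below) =====
def Claim_equal_dic2table : Prop := ∀ (dic : List (String × List (String × String))) (transpose : Bool), Dom_dic2table dic transpose → Pre_dic2table dic transpose → Spec_dic2table dic transpose (dic2table dic transpose)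

-- ===== LEMMAS AND PROOFS =====

-- (range l.length).map (fun k => f (l.getD k d)) = l.map f
theorem pv_map_range_getD {α β : Type} (f : α → β) (d : α) (l : List α) :
    (List.range l.length).map (fun k => f (l.getD k d)) = l.map f := by
  induction l with
  | nil => simp
  | cons x xs ih =>
      simp only [List.length_cons, List.range_succ_eq_map, List.map_cons, List.map_map]
      simpa using ih

theorem pv_transpose_eq (cols : List String) (ds : List (String × PySem.Dict String String)) :
    (PySem.List.pyRange 0
        ((PySem.List.pyGetD
            (("" :: cols) :: ds.map (fun rv => rv.1 :: cols.map (fun k => rv.2.getD k "")))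
            0 []).length : Int) 1).map (fun j =>
      (PySem.List.pyRange 0
          ((("" :: cols) :: ds.map (fun rv => rv.1 :: cols.map (fun k => rv.2.getD k ""))).length : Int) 1).foldl
        (fun acc i => acc ++
          [PySem.List.pyGetD
            (PySem.List.pyGetD
              (("" :: cols) :: ds.map (fun rv => rv.1 :: cols.map (fun k => rv.2.getD k ""))) i [])
            j ""]) [])
    = ("" :: ds.map (·.1)) :: cols.map (fun c => c :: ds.map (fun rv => rv.2.getD c "")) := by
  set strs := ("" :: cols) :: ds.map (fun rv => rv.1 :: cols.map (fun k => rv.2.getD k "")) with hstrs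
  have hinner : ∀ j : Int,
      (PySem.List.pyRange 0 (strs.length : Int) 1).foldl
        (fun acc i => acc ++ [PySem.List.pyGetD (PySem.List.pyGetD strs i []) j ""]) []
      = strs.map (fun row => PySem.List.pyGetD row j "") := by
    intro j
    rw [PySem.List.foldl_pyRange_zero_pyGetD' strs ([] : List String)
      (fun acc row => acc ++ [PySem.List.pyGetD row j ""]) []]
    simp only [PySem.List.foldl_append_singleton_eq_map, List.nil_append]
  simp only [hinner]
  have h0 : PySem.List.pyGetD strs 0 [] = "" :: cols := PySem.List.pyGetD_zero_cons _ _ _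
  rw [h0]
  have hlen : ("" :: cols).length = cols.length + 1 := rfl
  rw [hlen, PySem.List.pyRange_zero_nat (cols.length + 1)]
  rw [List.range_succ_eq_map, List.map_cons, List.map_cons, List.map_map]
  refine List.cons_eq_cons.mpr ⟨?_, ?_⟩
  · -- column j = 0 is the header of row names
    simp [hstrs, PySem.List.pyGetD, List.map_map, Function.comp]
  · -- column j = k+1 is the row for col_names[k]
    rw [List.map_map]
    have hcol : ∀ k, k < cols.length →
        strs.map (fun row => PySem.List.pyGetD row ((Nat.succ k : Nat) : Int) "")
        = (cols.getD k "") :: ds.map (fun rv => rv.2.getD (cols.getD k "") "") := by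
      intro k hk
      simp only [hstrs, List.map_cons, List.map_map]
      refine List.cons_eq_cons.mpr ⟨?_, ?_⟩
      · rw [show ((Nat.succ k : Nat) : Int) = ((Nat.succ k : Nat) : Int) from rfl,
            PySem.List.pyGetD_natCast, List.getD_cons_succ]
      · refine List.map_congr_left (fun rv _ => ?_)
        simp only [Function.comp]
        rw [PySem.List.pyGetD_natCast]
        rw [List.getD_cons_succ]
        rw [List.getD_eq_getElem _ _ (by simpa using hk),
            List.getD_eq_getElem _ _ (by simpa using hk)]
        simp
    have step : (List.range cols.length).map
        (((fun j : Int => strs.map (fun row => PySem.List.pyGetD row j "")) ∘ fun k : Nat => (k : Int)) ∘ Nat.succ)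
        = (List.range cols.length).map
            (fun k => (cols.getD k "") :: ds.map (fun rv => rv.2.getD (cols.getD k "") "")) :=
      List.map_congr_left (fun k hk => hcol k (List.mem_range.mp hk))
    rw [step]
    exact pv_map_range_getD (fun c => c :: ds.map (fun rv => rv.2.getD c "")) "" cols

-- ===== VERDICT (by name: the statement is the Claim_ definition above) =====
theorem dic2table_spec : Claim_equal_dic2table := by
  intro dic transpose _ _
  unfold Spec_dic2table dic2table dic2table_alt
  cases transpose with
  | false => rfl
  | true =>
      exact pv_transpose_eq _ _
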